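-- pv_equiv track=rewrite | github.com/xwhzz/tilelang | tilelang/analysis/trace_emitter.py | _combine_with_outer_dims
-- ===== SOURCE A (Python) =====
-- import itertools
--
-- def _combine_with_outer_dims(
--
--     swizzled_plane: list[tuple[int, int]],
--     major_name: str,
--     minor_name: str,
--     other_dims: list[str],
--     dims_config: dict[str, int],
-- ) -> list[dict[str, int]]:
--     """Combine swizzled 2D plane with remaining dimensions via Cartesian product."""
--     if not other_dims:
--         return [
--             {major_name: maj, minor_name: min_} for maj, min_ in swizzled_plane
--         ]
--
--     final_coords = []
--     other_ranges = [range(dims_config[dim]) for dim in other_dims]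
--
--     for combination in itertools.product(*other_ranges):
--         outer_dict = dict(zip(other_dims, combination))
--         for maj_val, min_val in swizzled_plane:
--             point = outer_dict.copy()
--             point[major_name] = maj_val
--             point[minor_name] = min_val
--             final_coords.append(point)
--
--     return final_coords
-- ===== SOURCE B (Python) =====
-- def _combine_with_outer_dims(
--     swizzled_plane,
--     major_name,
--     minor_name,
--     other_dims,
--     dims_config,
-- ):
--     """Staged expansion: start from the plane dicts, then prefix each outer
--     dimension (right to left), multiplying the coordinate list at each stage."""
--     coords = [{major_name: maj, minor_name: min_} for maj, min_ in swizzled_plane]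
--     for dim in reversed(other_dims):
--         coords = [{dim: v, **d} for v in range(dims_config[dim]) for d in coords]
--     return coords
-- ===== Notes on version B (the rewrite author's own statement) =====
-- stated objective: alternative
-- what changed: Replaces the empty-dims special case plus itertools.product with nested loops by a staged expansion: start from the plane dicts and, for each outer dimension taken right-to-left, multiply the coordinate list by prefixing that dimension's values, reusing the previous stage's dicts.
import Mathlib
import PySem

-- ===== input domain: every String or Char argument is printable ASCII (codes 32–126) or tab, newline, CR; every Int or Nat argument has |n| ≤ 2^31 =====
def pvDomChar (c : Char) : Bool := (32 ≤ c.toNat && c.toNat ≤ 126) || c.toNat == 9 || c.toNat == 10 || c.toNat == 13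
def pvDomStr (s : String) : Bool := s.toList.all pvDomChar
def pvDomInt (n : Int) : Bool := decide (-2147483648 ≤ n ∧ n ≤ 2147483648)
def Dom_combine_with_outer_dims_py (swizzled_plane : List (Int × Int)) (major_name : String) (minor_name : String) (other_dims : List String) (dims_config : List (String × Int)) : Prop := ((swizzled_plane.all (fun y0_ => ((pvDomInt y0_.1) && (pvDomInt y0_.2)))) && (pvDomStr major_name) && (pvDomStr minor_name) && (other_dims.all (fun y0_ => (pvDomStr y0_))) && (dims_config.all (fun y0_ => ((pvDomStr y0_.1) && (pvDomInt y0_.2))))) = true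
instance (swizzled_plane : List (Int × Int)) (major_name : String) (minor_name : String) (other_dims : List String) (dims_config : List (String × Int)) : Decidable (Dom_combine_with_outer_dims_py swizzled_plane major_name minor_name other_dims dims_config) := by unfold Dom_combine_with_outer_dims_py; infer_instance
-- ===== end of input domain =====

-- B replaces A's empty-dims special case and product-then-dict nested loops by a staged
-- expansion that prefixes one outer dimension per stage onto the previous stage's dicts
-- (objective: alternative decomposition, same cost).

-- ===== PORT A =====

-- dims_config[dim] on the Python dict built from the association list (later duplicates
-- overwrite); the default 0 is never reached inside Pre_.
def pvCfgLookup (dims_config : List (String × Int)) (dim : String) : Int :=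
  (PySem.Dict.ofList dims_config).getD dim 0

-- itertools.product(*rs): leftmost axis varies slowest
def pvProduct : List (List Int) → List (List Int)
  | [] => [[]]
  | r :: rs => r.flatMap (fun x => (pvProduct rs).map (fun c => x :: c))

def combine_with_outer_dims_py (swizzled_plane : List (Int × Int)) (major_name : String) (minor_name : String) (other_dims : List String) (dims_config : List (String × Int)) : List (List (String × Int)) :=
  if other_dims.isEmpty then
    swizzled_plane.map (fun p =>
      (((PySem.Dict.empty).insert major_name p.1).insert minor_name p.2).items)
  else
    let other_ranges := other_dims.map (fun dim => PySem.List.pyRange 0 (pvCfgLookup dims_config dim) 1)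
    (pvProduct other_ranges).flatMap (fun combination =>
      let outer_dict := PySem.Dict.ofList (other_dims.zip combination)
      swizzled_plane.map (fun p =>
        ((outer_dict.insert major_name p.1).insert minor_name p.2).items))

-- ===== PORT B =====

-- the Python dict display {dim: v, **d}: start from {dim: v}, then merge d's pairs in order
def pvExtendDict (dim : String) (v : Int) (d : List (String × Int)) : List (String × Int) :=
  (d.foldl (fun acc kv => acc.insert kv.1 kv.2) ((PySem.Dict.empty).insert dim v)).items

def combine_with_outer_dims_py_alt (swizzled_plane : List (Int × Int)) (major_name : String) (minor_name : String) (other_dims : List String) (dims_config : List (String × Int)) : List (List (String × Int)) :=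
  let base := swizzled_plane.map (fun p =>
    (((PySem.Dict.empty).insert major_name p.1).insert minor_name p.2).items)
  other_dims.reverse.foldl
    (fun coords dim =>
      (PySem.List.pyRange 0 (pvCfgLookup dims_config dim) 1).flatMap
        (fun v => coords.map (fun d => pvExtendDict dim v d)))
    base

-- ===== PRECONDITION & SPEC =====
-- Pre_ excludes exactly the inputs where Python A raises KeyError: some dim of other_dims
-- missing from dims_config.
def Pre_combine_with_outer_dims_py (swizzled_plane : List (Int × Int)) (major_name : String) (minor_name : String) (other_dims : List String) (dims_config : List (String × Int)) : Prop :=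
  ∀ dim ∈ other_dims, dim ∈ dims_config.map Prod.fst
instance (swizzled_plane : List (Int × Int)) (major_name : String) (minor_name : String) (other_dims : List String) (dims_config : List (String × Int)) : Decidable (Pre_combine_with_outer_dims_py swizzled_plane major_name minor_name other_dims dims_config) := by unfold Pre_combine_with_outer_dims_py; infer_instance

def pvWitness_combine_with_outer_dims_py : (List (Int × Int)) × String × String × List String × (List (String × Int)) :=
  ([(0, 0), (0, 1)], "row", "col", ["b"], [("b", 2)])

def Spec_combine_with_outer_dims_py (swizzled_plane : List (Int × Int)) (major_name : String) (minor_name : String) (other_dims : List String) (dims_config : List (String × Int)) (out : List (List (String × Int))) : Prop := out = combine_with_outer_dims_py_alt swizzled_plane major_name minor_name other_dims dims_config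
instance (swizzled_plane : List (Int × Int)) (major_name : String) (minor_name : String) (other_dims : List String) (dims_config : List (String × Int)) (out : List (List (String × Int))) : Decidable (Spec_combine_with_outer_dims_py swizzled_plane major_name minor_name other_dims dims_config out) := by unfold Spec_combine_with_outer_dims_py; infer_instance

-- ===== CLAIM (what is proved, stated in full; the proofs are below) =====
def Claim_equal_combine_with_outer_dims_py : Prop := ∀ (swizzled_plane : List (Int × Int)) (major_name : String) (minor_name : String) (other_dims : List String) (dims_config : List (String × Int)), Dom_combine_with_outer_dims_py swizzled_plane major_name minor_name other_dims dims_config → Pre_combine_with_outer_dims_py swizzled_plane major_name minor_name other_dims dims_config → Spec_combine_with_outer_dims_py swizzled_plane major_name minor_name other_dims dims_config (combine_with_outer_dims_py swizzled_plane major_name minor_name other_dims dims_config)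

-- ===== LEMMAS AND PROOFS =====

-- a sequence of dict inserts (dict.update with an association list, overwrite in place)
def pvUpd (acc : PySem.Dict String Int) (l : List (String × Int)) : PySem.Dict String Int :=
  l.foldl (fun d kv => d.insert kv.1 kv.2) acc

-- get? after an insert sequence: last matching pair of l, else acc
lemma pvUpd_get? (acc : PySem.Dict String Int) (l : List (String × Int)) (x : String) :
    (pvUpd acc l).get? x
      = ((l.reverse.find? (fun kv => kv.1 == x)).map Prod.snd).or (acc.get? x) := by
  induction l generalizing acc with
  | nil => simp [pvUpd]
  | cons kv t ih =>
      rw [show pvUpd acc (kv :: t) = pvUpd (acc.insert kv.1 kv.2) t from rfl, ih,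
        List.reverse_cons, List.find?_append]
      cases h : t.reverse.find? (fun kv => kv.1 == x) with
      | some w => simp
      | none =>
          by_cases hkx : kv.1 = x
          · simp [hkx, PySem.Dict.get?_insert_self]
          · have hb : (kv.1 == x) = false := by simp [hkx]
            simp [hb, PySem.Dict.get?_insert, Ne.symm hkx]

lemma pvUpd_keys (acc : PySem.Dict String Int) (l : List (String × Int)) :
    (pvUpd acc l).keys = PySem.Set.update acc.keys (l.map Prod.fst) :=
  PySem.Dict.keys_foldl_insert_key l Prod.fst (fun _ x => x.2) acc

lemma pvUpd_nodup_keys (acc : PySem.Dict String Int) (l : List (String × Int))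
    (h : acc.keys.Nodup) : (pvUpd acc l).keys.Nodup :=
  PySem.Dict.nodup_keys_foldl_insert_key l Prod.fst (fun _ x => x.2) acc h

-- two dicts with duplicate-free keys are equal iff keys and lookups agree
lemma pvDict_eq_of (d₁ d₂ : PySem.Dict String Int) (h₁ : d₁.keys.Nodup)
    (hk : d₁.keys = d₂.keys) (hg : ∀ x, d₁.get? x = d₂.get? x) : d₁ = d₂ := by
  apply PySem.Dict.ext
  rw [PySem.Dict.items_eq_map_keys d₁ h₁ 0, PySem.Dict.items_eq_map_keys d₂ (hk ▸ h₁) 0, hk]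
  apply List.map_congr_left
  intro k _
  rw [PySem.Dict.getD_eq_get?_getD, PySem.Dict.getD_eq_get?_getD, hg]

-- with duplicate-free keys, the last match equals the first match
lemma pv_find?_reverse (l : List (String × Int)) (h : (l.map Prod.fst).Nodup) (x : String) :
    l.reverse.find? (fun kv => kv.1 == x) = l.find? (fun kv => kv.1 == x) := by
  induction l with
  | nil => rfl
  | cons kv t ih =>
      simp only [List.map_cons, List.nodup_cons] at h
      rw [List.reverse_cons, List.find?_append, ih h.2, List.find?_cons]
      by_cases hkx : kv.1 = x
      · have hnone : t.find? (fun kv => kv.1 == x) = none := by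
          rw [List.find?_eq_none]
          intro p hp hpx
          exact h.1 (by rw [hkx, ← (beq_iff_eq).mp hpx]; exact List.mem_map_of_mem hp)
        simp [hnone, hkx]
      · have hb : (kv.1 == x) = false := by simp [hkx]
        simp [hb]

-- get? of a dict is the first matching item
lemma pv_get?_eq_find? (d : PySem.Dict String Int) (x : String) :
    d.get? x = (d.items.find? (fun kv => kv.1 == x)).map Prod.snd := by
  rw [show d = PySem.Dict.mk d.items from rfl]
  induction d.items with
  | nil => rfl
  | cons kv t ih =>
      rw [PySem.Dict.get?_mk_cons, List.find?_cons]
      by_cases hkx : kv.1 = x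
      · simp [hkx]
      · have hb : (kv.1 == x) = false := by simp [hkx]
        simp [hb, ih]

-- NORMAL FORM: replaying the items of the dict an insert sequence builds
-- has the same effect as replaying the sequence itself
lemma pvUpd_items_norm (acc : PySem.Dict String Int) (hacc : acc.keys.Nodup)
    (l : List (String × Int)) :
    pvUpd acc (pvUpd PySem.Dict.empty l).items = pvUpd acc l := by
  have hnd : (pvUpd PySem.Dict.empty l).keys.Nodup :=
    pvUpd_nodup_keys _ _ (by simp [PySem.Dict.keys_empty])
  apply pvDict_eq_of _ _ (pvUpd_nodup_keys _ _ hacc)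
  · -- keys agree
    rw [pvUpd_keys, pvUpd_keys,
      show ((pvUpd PySem.Dict.empty l).items).map Prod.fst = (pvUpd PySem.Dict.empty l).keys
        from rfl,
      pvUpd_keys, PySem.Dict.keys_empty, PySem.Set.update_nil_left,
      PySem.Set.update_eq_append_filter, PySem.Set.update_eq_append_filter,
      PySem.Set.ofList_ofList]
  · -- lookups agree
    intro x
    rw [pvUpd_get?, pvUpd_get?]
    congr 1
    rw [pv_find?_reverse _ hnd x, ← pv_get?_eq_find?, pvUpd_get?]
    simp [PySem.Dict.get?_empty]

-- {dim: v, **d} on a dict's items is the dict of the extended insert sequence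
lemma pv_merge (dim : String) (v : Int) (l : List (String × Int)) :
    pvExtendDict dim v (pvUpd PySem.Dict.empty l).items
      = (pvUpd PySem.Dict.empty ((dim, v) :: l)).items := by
  show (pvUpd ((PySem.Dict.empty).insert dim v) (pvUpd PySem.Dict.empty l).items).items = _
  rw [pvUpd_items_norm _ (by
    have := PySem.Dict.nodup_keys_insert (d := (PySem.Dict.empty : PySem.Dict String Int))
      (k := dim) (v := v) (by simp [PySem.Dict.keys_empty])
    exact this)]
  rfl

-- the staged fold of B equals the flattened product of A, by induction on the dim list
lemma pv_stage_eq (plane : List (Int × Int)) (M m : String) (cfg : List (String × Int))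
    (ds : List String) :
    ds.reverse.foldl
      (fun coords dim =>
        (PySem.List.pyRange 0 (pvCfgLookup cfg dim) 1).flatMap
          (fun v => coords.map (fun d => pvExtendDict dim v d)))
      (plane.map (fun p => (pvUpd PySem.Dict.empty [(M, p.1), (m, p.2)]).items))
    = (pvProduct (ds.map (fun dim => PySem.List.pyRange 0 (pvCfgLookup cfg dim) 1))).flatMap
        (fun c => plane.map (fun p =>
          (pvUpd PySem.Dict.empty (ds.zip c ++ [(M, p.1), (m, p.2)])).items)) := by
  induction ds with
  | nil => simp [pvProduct]
  | cons d ds ih =>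
      rw [List.reverse_cons, List.foldl_append, ih]
      simp only [List.foldl_cons, List.foldl_nil, pvProduct, List.map_cons]
      rw [List.flatMap_assoc]
      apply List.flatMap_congr
      intro v _
      rw [List.map_flatMap, List.flatMap_map]
      apply List.flatMap_congr
      intro c _
      rw [List.map_map]
      apply List.map_congr_left
      intro p _
      simp only [Function.comp_apply, pv_merge, List.zip_cons_cons, List.cons_append]

theorem combine_with_outer_dims_py_spec : Claim_equal_combine_with_outer_dims_py := by
  intro plane M m ds cfg _ _
  unfold Spec_combine_with_outer_dims_py
  unfold combine_with_outer_dims_py combine_with_outer_dims_py_alt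
  rw [show (plane.map (fun p => (((PySem.Dict.empty).insert M p.1).insert m p.2).items))
        = plane.map (fun p => (pvUpd PySem.Dict.empty [(M, p.1), (m, p.2)]).items) from rfl]
  rw [pv_stage_eq plane M m cfg ds]
  cases ds with
  | nil => simp [pvProduct, pvUpd]
  | cons d ds' =>
      simp only [List.isEmpty_cons, Bool.false_eq_true, if_false]
      apply List.flatMap_congr
      intro c _
      apply List.map_congr_left
      intro p _
      show (pvUpd (pvUpd PySem.Dict.empty ((d :: ds').zip c)) [(M, p.1), (m, p.2)]).items = _
      rw [show pvUpd (pvUpd PySem.Dict.empty ((d :: ds').zip c)) [(M, p.1), (m, p.2)]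
            = pvUpd PySem.Dict.empty ((d :: ds').zip c ++ [(M, p.1), (m, p.2)])
          from (List.foldl_append ..).symm]
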